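-- pv_equiv track=rewrite | github.com/ViridaAlice/FKIE_movie_dialogue | evaluate_agesex.py | get_char_mapping_and_text
-- ===== SOURCE A (Python) =====
-- MAX_CONTEXT_CHARS = 12000
--
-- def get_char_mapping_and_text(interactions_list):
--     """
--     1. Identifies the two main characters.
--     2. Maps them to 'Person A' and 'Person B'.
--     3. Flattens ALL interactions into one long anonymized script.
--     """
--     unique_chars = []
--
--     # 1. Identify Characters
--     for interaction in interactions_list:
--         for line in interaction:
--             char_name = line.get("character", "Unknown")
--             if char_name not in unique_chars:
--                 unique_chars.append(char_name)
--
--     # 2. Create Mapping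
--     char_map = {} # Real Name -> Anon Name
--     reverse_map = {} # Anon Name -> Real Name
--
--     if len(unique_chars) > 0:
--         char_map[unique_chars[0]] = "Person A"
--         reverse_map["Person A"] = unique_chars[0]
--     if len(unique_chars) > 1:
--         char_map[unique_chars[1]] = "Person B"
--         reverse_map["Person B"] = unique_chars[1]
--
--     # Handle extras just in case
--     for i, char in enumerate(unique_chars[2:]):
--         anon = f"Person {chr(67+i)}"
--         char_map[char] = anon
--         reverse_map[anon] = char
--
--     # 3. Flatten and Anonymize Text
--     full_transcript = []
--
--     for interaction in interactions_list:
--         for line_obj in interaction: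
--             real_char = line_obj.get("character", "Unknown")
--             anon_char = char_map.get(real_char, "Unknown")
--             dialogue = line_obj.get("dialogue", "")
--             full_transcript.append(f"{anon_char}: {dialogue}")
--         full_transcript.append("--- [New Interaction] ---")
--
--     combined_text = "\n".join(full_transcript)
--
--     # 4. Truncate if too long to fit in context window
--     # Strategy: Keep the beginning (intros) and end (resolutions), cut the middle.
--     if len(combined_text) > MAX_CONTEXT_CHARS:
--         half_limit = int(MAX_CONTEXT_CHARS / 2)
--         combined_text = combined_text[:half_limit] + "\n...[SECTION OMITTED FOR LENGTH]...\n" + combined_text[-half_limit:]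
--
--     return combined_text, reverse_map
-- ===== SOURCE B (Python) =====
-- MAX_CONTEXT_CHARS = 12000
--
-- def get_char_mapping_and_text(interactions_list):
--     # One fused pass: assign "Person <chr(65+n)>" at first encounter of each
--     # character while building the transcript, instead of A's separate
--     # identify / map / flatten passes.
--     char_map = {}
--     reverse_map = {}
--     transcript = []
--     for interaction in interactions_list:
--         for line in interaction:
--             name = line.get("character", "Unknown")
--             anon = char_map.get(name)
--             if anon is None:
--                 anon = "Person " + chr(65 + len(char_map))
--                 char_map[name] = anon
--                 reverse_map[anon] = name
--             transcript.append(anon + ": " + line.get("dialogue", ""))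
--         transcript.append("--- [New Interaction] ---")
--     combined = "\n".join(transcript)
--     if len(combined) > MAX_CONTEXT_CHARS:
--         half = MAX_CONTEXT_CHARS // 2
--         combined = combined[:half] + "\n...[SECTION OMITTED FOR LENGTH]...\n" + combined[-half:]
--     return combined, reverse_map
-- ===== Notes on version B (the rewrite author's own statement) =====
-- stated objective: simpler
-- what changed: A's three passes (collect unique characters, build the char/reverse maps piecewise, then re-scan all interactions to anonymize) are fused into a single pass that assigns 'Person chr(65+n)' at each character's first encounter while emitting the transcript; the join-and-truncate tail is unchanged.
import Mathlib
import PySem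

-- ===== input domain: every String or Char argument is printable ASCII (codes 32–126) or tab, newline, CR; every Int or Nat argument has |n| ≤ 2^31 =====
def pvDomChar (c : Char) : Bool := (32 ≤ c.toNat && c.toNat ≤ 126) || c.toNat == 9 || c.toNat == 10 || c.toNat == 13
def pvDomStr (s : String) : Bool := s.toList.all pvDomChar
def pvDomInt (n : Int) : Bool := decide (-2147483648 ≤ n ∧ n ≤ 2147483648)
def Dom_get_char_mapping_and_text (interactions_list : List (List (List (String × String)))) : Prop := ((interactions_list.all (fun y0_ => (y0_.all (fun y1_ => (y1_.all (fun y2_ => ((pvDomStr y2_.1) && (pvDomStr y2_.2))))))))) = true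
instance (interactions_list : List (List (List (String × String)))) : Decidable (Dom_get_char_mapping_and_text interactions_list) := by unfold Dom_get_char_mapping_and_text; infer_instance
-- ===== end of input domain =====

-- B fuses A's identify / map / flatten passes into one first-encounter loop; objective: simpler (one pass), same result.

-- shared primitives (Python built-ins)
-- Python chr(n); exact for codepoints below the surrogate range (all uses here are 'A', 'B', …)
def pvChr (n : Int) : String := String.ofList [Char.ofNat n.toNat]
-- line.get(k, d) on a str->str dict
def pvLineGet (line : List (String × String)) (k d : String) : String :=
  (PySem.Dict.mk line).getD k d

-- ===== PORT A =====
def pvA_uniqStep (acc : List String) (line : List (String × String)) : List String :=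
  if acc.contains (pvLineGet line "character" "Unknown") then acc
  else acc ++ [pvLineGet line "character" "Unknown"]

def pvA_uniq (interactions_list : List (List (List (String × String)))) : List String :=
  interactions_list.foldl (fun acc interaction => interaction.foldl pvA_uniqStep acc) []

def pvA_maps (unique_chars : List String) :
    PySem.Dict String String × PySem.Dict String String :=
  let cm : PySem.Dict String String := PySem.Dict.empty
  let rm : PySem.Dict String String := PySem.Dict.empty
  let p :=
    if 0 < unique_chars.length then
      (cm.insert (PySem.List.pyGetD unique_chars 0 "") "Person A",
       rm.insert "Person A" (PySem.List.pyGetD unique_chars 0 ""))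
    else (cm, rm)
  let p :=
    if 1 < unique_chars.length then
      (p.1.insert (PySem.List.pyGetD unique_chars 1 "") "Person B",
       p.2.insert "Person B" (PySem.List.pyGetD unique_chars 1 ""))
    else p
  (PySem.List.enumerate (PySem.List.slice unique_chars (some 2) none) 0).foldl
    (fun q ic =>
      let anon := "Person " ++ pvChr (67 + ic.1)
      (q.1.insert ic.2 anon, q.2.insert anon ic.2)) p

def pvA_transcript (interactions_list : List (List (List (String × String))))
    (char_map : PySem.Dict String String) : List String :=
  interactions_list.foldl (fun full_transcript interaction =>
    interaction.foldl (fun tr line =>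
      tr ++ [char_map.getD (pvLineGet line "character" "Unknown") "Unknown"
             ++ ": " ++ pvLineGet line "dialogue" ""]) full_transcript
    ++ ["--- [New Interaction] ---"]) []

-- shared tail: "\n".join + middle truncation (identical code in both Pythons);
-- half_limit = int(MAX_CONTEXT_CHARS / 2) = 6000 (exact constant division)
def pvFinish (full_transcript : List String) : String :=
  let combined_text := PySem.Str.join "\n" full_transcript
  if 12000 < PySem.Str.len combined_text then
    String.ofList (PySem.List.slice combined_text.toList none (some 6000))
      ++ "\n...[SECTION OMITTED FOR LENGTH]...\n"
      ++ String.ofList (PySem.List.slice combined_text.toList (some (-6000)) none)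
  else combined_text

def get_char_mapping_and_text (interactions_list : List (List (List (String × String)))) :
    String × (List (String × String)) :=
  let unique_chars := pvA_uniq interactions_list
  let maps := pvA_maps unique_chars
  (pvFinish (pvA_transcript interactions_list maps.1), maps.2.items)

-- ===== PORT B =====
def pvB_step (st : PySem.Dict String String × PySem.Dict String String × List String)
    (line : List (String × String)) :
    PySem.Dict String String × PySem.Dict String String × List String :=
  let name := pvLineGet line "character" "Unknown"
  match st.1.get? name with
  | some anon => (st.1, st.2.1, st.2.2 ++ [anon ++ ": " ++ pvLineGet line "dialogue" ""])
  | none =>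
      let anon := "Person " ++ pvChr (65 + (st.1.size : Int))
      (st.1.insert name anon, st.2.1.insert anon name,
       st.2.2 ++ [anon ++ ": " ++ pvLineGet line "dialogue" ""])

def pvB_loop (interactions_list : List (List (List (String × String))))
    (st : PySem.Dict String String × PySem.Dict String String × List String) :
    PySem.Dict String String × PySem.Dict String String × List String :=
  interactions_list.foldl (fun st interaction =>
    let st := interaction.foldl pvB_step st
    (st.1, st.2.1, st.2.2 ++ ["--- [New Interaction] ---"])) st

def get_char_mapping_and_text_alt (interactions_list : List (List (List (String × String)))) :
    String × (List (String × String)) :=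
  let st := pvB_loop interactions_list (PySem.Dict.empty, PySem.Dict.empty, [])
  (pvFinish st.2.2, st.2.1.items)

-- ===== PRECONDITION & SPEC =====
def Spec_get_char_mapping_and_text (interactions_list : List (List (List (String × String))))
    (out : String × (List (String × String))) : Prop :=
  out = get_char_mapping_and_text_alt interactions_list

instance (interactions_list : List (List (List (String × String))))
    (out : String × (List (String × String))) :
    Decidable (Spec_get_char_mapping_and_text interactions_list out) := by
  unfold Spec_get_char_mapping_and_text; infer_instance

-- ===== CLAIM =====
def Claim_equal_get_char_mapping_and_text : Prop :=
  ∀ (interactions_list : List (List (List (String × String)))),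
    Dom_get_char_mapping_and_text interactions_list →
    Spec_get_char_mapping_and_text interactions_list (get_char_mapping_and_text interactions_list)

-- ===== LEMMAS AND PROOFS =====

-- "Person <chr(65+k)>", the anonymous name of the k-th distinct character
def anonIdx (k : Nat) : String := "Person " ++ pvChr (65 + (k : Int))

-- canonical forms of the two maps: insert the names in order with their indexed anonymous names
def mkCM : List String → Nat → PySem.Dict String String → PySem.Dict String String
  | [], _, d => d
  | c :: cs, k, d => mkCM cs (k + 1) (d.insert c (anonIdx k))

def mkRM : List String → Nat → PySem.Dict String String → PySem.Dict String String
  | [], _, d => d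
  | c :: cs, k, d => mkRM cs (k + 1) (d.insert (anonIdx k) c)

lemma uStep_prefix (acc : List String) (line : List (String × String)) :
    acc <+: pvA_uniqStep acc line := by
  unfold pvA_uniqStep
  split
  · exact List.prefix_refl acc
  · exact List.prefix_append acc _

lemma uLines_prefix (lines : List (List (String × String))) (acc : List String) :
    acc <+: lines.foldl pvA_uniqStep acc := by
  induction lines generalizing acc with
  | nil => exact List.prefix_refl acc
  | cons l ls ih =>
      exact (uStep_prefix acc l).trans (by simpa using ih (pvA_uniqStep acc l))

lemma uInts_prefix (ints : List (List (List (String × String)))) (acc : List String) :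
    acc <+: ints.foldl (fun a i => i.foldl pvA_uniqStep a) acc := by
  induction ints generalizing acc with
  | nil => exact List.prefix_refl acc
  | cons l ls ih =>
      exact (uLines_prefix l acc).trans (by simpa using ih (l.foldl pvA_uniqStep acc))

lemma uStep_nodup (acc : List String) (line : List (String × String)) (h : acc.Nodup) :
    (pvA_uniqStep acc line).Nodup := by
  unfold pvA_uniqStep
  split
  · exact h
  · next hc =>
      have hnm : pvLineGet line "character" "Unknown" ∉ acc := by
        simpa [List.contains_iff_mem] using hc
      simp [List.nodup_append, h]
      exact fun a ha hb => hnm (hb ▸ ha)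

lemma uLines_nodup (lines : List (List (String × String))) (acc : List String) (h : acc.Nodup) :
    (lines.foldl pvA_uniqStep acc).Nodup := by
  induction lines generalizing acc with
  | nil => exact h
  | cons l ls ih => simpa using ih (pvA_uniqStep acc l) (uStep_nodup acc l h)

lemma uniq_nodup (ints : List (List (List (String × String)))) : (pvA_uniq ints).Nodup := by
  unfold pvA_uniq
  suffices h : ∀ acc : List String, acc.Nodup →
      (ints.foldl (fun a i => i.foldl pvA_uniqStep a) acc).Nodup from h [] (by simp)
  induction ints with
  | nil => intro acc h; exact h
  | cons l ls ih => intro acc h; simpa using ih (l.foldl pvA_uniqStep acc) (uLines_nodup l acc h)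

lemma prefix_idxOf {acc U : List String} (h : acc <+: U) {x : String} (hx : x ∈ acc) :
    U.idxOf x = acc.idxOf x := by
  obtain ⟨t, rfl⟩ := h
  exact List.idxOf_append_of_mem hx

-- mkCM lookups
lemma mkCM_get?_of_not_mem (cs : List String) (k : Nat) (d : PySem.Dict String String)
    {x : String} (hx : x ∉ cs) : (mkCM cs k d).get? x = d.get? x := by
  induction cs generalizing k d with
  | nil => rfl
  | cons c cs ih =>
      simp only [List.mem_cons, not_or] at hx
      rw [mkCM, ih _ _ hx.2, PySem.Dict.get?_insert_of_ne _ _ hx.1]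

lemma mkCM_get?_of_mem (cs : List String) (k : Nat) (d : PySem.Dict String String)
    (hnd : cs.Nodup) {x : String} (hx : x ∈ cs) :
    (mkCM cs k d).get? x = some (anonIdx (k + cs.idxOf x)) := by
  induction cs generalizing k d with
  | nil => cases hx
  | cons c cs ih =>
      rw [mkCM]
      rcases List.mem_cons.mp hx with rfl | hx'
      · rw [mkCM_get?_of_not_mem _ _ _ (List.nodup_cons.mp hnd).1,
          PySem.Dict.get?_insert_self]
        simp
      · have hne : x ≠ c := by
          rintro rfl; exact (List.nodup_cons.mp hnd).1 hx'
        rw [ih _ _ (List.nodup_cons.mp hnd).2 hx', List.idxOf_cons_ne _ (Ne.symm hne)]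
        congr 2
        omega

lemma mkCM_size (cs : List String) (k : Nat) (d : PySem.Dict String String)
    (hnd : cs.Nodup) (hf : ∀ c ∈ cs, d.contains c = false) :
    (mkCM cs k d).size = d.size + cs.length := by
  induction cs generalizing k d with
  | nil => simp [mkCM]
  | cons c cs ih =>
      rw [mkCM, ih _ _ (List.nodup_cons.mp hnd).2, PySem.Dict.size_insert,
        if_neg (by simp [hf c (by simp)]), List.length_cons]
      · omega
      · intro x hx
        rw [PySem.Dict.contains_insert]
        have : x ≠ c := by rintro rfl; exact (List.nodup_cons.mp hnd).1 hx
        simp [this, hf x (by simp [hx])]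

lemma mkCM_append (cs : List String) (x : String) (k : Nat) (d : PySem.Dict String String) :
    mkCM (cs ++ [x]) k d = (mkCM cs k d).insert x (anonIdx (k + cs.length)) := by
  induction cs generalizing k d with
  | nil => simp [mkCM]
  | cons c cs ih =>
      rw [List.cons_append, mkCM, mkCM, ih]
      congr 2
      simp
      omega

lemma mkRM_append (cs : List String) (x : String) (k : Nat) (d : PySem.Dict String String) :
    mkRM (cs ++ [x]) k d = (mkRM cs k d).insert (anonIdx (k + cs.length)) x := by
  induction cs generalizing k d with
  | nil => simp [mkRM]
  | cons c cs ih =>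
      rw [List.cons_append, mkRM, mkRM, ih]
      congr 2
      simp
      omega

-- A's piecewise map construction equals the canonical indexed one
lemma maps_aux (rest : List String) (s : Nat)
    (cm rm : PySem.Dict String String) :
    (PySem.List.enumerate rest (s : Int)).foldl
      (fun q ic =>
        (q.1.insert ic.2 ("Person " ++ pvChr (67 + ic.1)),
         q.2.insert ("Person " ++ pvChr (67 + ic.1)) ic.2)) (cm, rm)
      = (mkCM rest (s + 2) cm, mkRM rest (s + 2) rm) := by
  induction rest generalizing s cm rm with
  | nil => simp [PySem.List.enumerate_nil, mkCM, mkRM]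
  | cons c cs ih =>
      rw [PySem.List.enumerate_cons, List.foldl_cons]
      dsimp only
      have hcast : ((s : Int) + 1) = ((s + 1 : Nat) : Int) := by omega
      have hanon : "Person " ++ pvChr (67 + (s : Int)) = anonIdx (s + 2) := by
        unfold anonIdx
        rw [show ((65 : Int) + ((s + 2 : Nat) : Int)) = 67 + (s : Int) by push_cast; ring]
      rw [hcast, ih]
      simp only [hanon, mkCM, mkRM]

lemma maps_eq (U : List String) :
    pvA_maps U = (mkCM U 0 PySem.Dict.empty, mkRM U 0 PySem.Dict.empty) := by
  match U with
  | [] => rfl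
  | [a] => rfl
  | a :: b :: rest =>
      unfold pvA_maps
      dsimp only
      rw [if_pos (by simp), if_pos (by simp)]
      have hs : PySem.List.slice (a :: b :: rest) (some 2) = rest := by
        rw [PySem.List.slice_from _ (by norm_num : (0 : Int) ≤ 2)]
        simp
      rw [hs]
      show (PySem.List.enumerate rest ((0 : Nat) : Int)).foldl _ _ = _
      rw [maps_aux]
      have e0 : ("Person A" : String) = anonIdx 0 := by decide
      have e1 : ("Person B" : String) = anonIdx 1 := by decide
      simp only [mkCM, mkRM, PySem.List.pyGetD_ofNat', e0, e1]
      norm_num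

-- the inner (per-interaction) loop of B tracks A's unique-list state and emits A's entries
lemma inner_eq (U : List String) (hU : U.Nodup)
    (lines : List (List (String × String))) :
    ∀ (acc tr : List String), acc.Nodup → (lines.foldl pvA_uniqStep acc) <+: U →
    lines.foldl pvB_step (mkCM acc 0 PySem.Dict.empty, mkRM acc 0 PySem.Dict.empty, tr)
      = (mkCM (lines.foldl pvA_uniqStep acc) 0 PySem.Dict.empty,
         mkRM (lines.foldl pvA_uniqStep acc) 0 PySem.Dict.empty,
         lines.foldl (fun tr line =>
           tr ++ [(mkCM U 0 PySem.Dict.empty).getD (pvLineGet line "character" "Unknown") "Unknown"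
                  ++ ": " ++ pvLineGet line "dialogue" ""]) tr) := by
  induction lines with
  | nil => intro acc tr _ _; rfl
  | cons line rest ih =>
      intro acc tr hnd hpre
      rw [List.foldl_cons, List.foldl_cons, List.foldl_cons] at *
      have hpre_acc : acc <+: U :=
        ((uStep_prefix acc line).trans (uLines_prefix rest _)).trans hpre
      by_cases hmem : pvLineGet line "character" "Unknown" ∈ acc
      · -- seen character: state unchanged
        have hstep : pvA_uniqStep acc line = acc := by
          unfold pvA_uniqStep; rw [if_pos (by simpa [List.contains_iff_mem] using hmem)]
        rw [hstep] at hpre ⊢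
        have hB : pvB_step (mkCM acc 0 PySem.Dict.empty, mkRM acc 0 PySem.Dict.empty, tr) line
            = (mkCM acc 0 PySem.Dict.empty, mkRM acc 0 PySem.Dict.empty,
               tr ++ [anonIdx (0 + acc.idxOf (pvLineGet line "character" "Unknown"))
                      ++ ": " ++ pvLineGet line "dialogue" ""]) := by
          unfold pvB_step
          dsimp only
          rw [mkCM_get?_of_mem acc 0 _ hnd hmem]
        have hA : (mkCM U 0 PySem.Dict.empty).getD (pvLineGet line "character" "Unknown") "Unknown"
            = anonIdx (0 + acc.idxOf (pvLineGet line "character" "Unknown")) := by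
          rw [PySem.Dict.getD_eq_get?_getD,
            mkCM_get?_of_mem U 0 _ hU (hpre_acc.subset hmem), Option.getD_some,
            prefix_idxOf hpre_acc hmem]
        rw [hB, ih _ _ hnd hpre, hA]
      · -- new character: both sides extend the state with it
        have hstep : pvA_uniqStep acc line = acc ++ [pvLineGet line "character" "Unknown"] := by
          unfold pvA_uniqStep
          rw [if_neg (by simpa [List.contains_iff_mem] using hmem)]
        rw [hstep] at hpre ⊢
        have hnd' : (acc ++ [pvLineGet line "character" "Unknown"]).Nodup := by
          simp [List.nodup_append, hnd]
          exact fun a ha hb => hmem (hb ▸ ha)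
        have hpre' : acc ++ [pvLineGet line "character" "Unknown"] <+: U :=
          (uLines_prefix rest _).trans hpre
        have hsz : (mkCM acc 0 PySem.Dict.empty).size = acc.length := by
          rw [mkCM_size acc 0 _ hnd (by intro c _; exact PySem.Dict.contains_empty c)]
          simp
        have hB : pvB_step (mkCM acc 0 PySem.Dict.empty, mkRM acc 0 PySem.Dict.empty, tr) line
            = (mkCM (acc ++ [pvLineGet line "character" "Unknown"]) 0 PySem.Dict.empty,
               mkRM (acc ++ [pvLineGet line "character" "Unknown"]) 0 PySem.Dict.empty,
               tr ++ [anonIdx acc.length ++ ": " ++ pvLineGet line "dialogue" ""]) := by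
          unfold pvB_step
          dsimp only
          rw [mkCM_get?_of_not_mem acc 0 _ hmem, PySem.Dict.get?_empty, hsz,
            mkCM_append, mkRM_append]
          simp [anonIdx]
        have hmemU : pvLineGet line "character" "Unknown" ∈ U :=
          hpre'.subset (by simp)
        have hidx : U.idxOf (pvLineGet line "character" "Unknown") = acc.length := by
          rw [prefix_idxOf hpre' (by simp), List.idxOf_append, if_neg hmem]
          simp
        have hA : (mkCM U 0 PySem.Dict.empty).getD (pvLineGet line "character" "Unknown") "Unknown"
            = anonIdx acc.length := by
          rw [PySem.Dict.getD_eq_get?_getD, mkCM_get?_of_mem U 0 _ hU hmemU, Option.getD_some, hidx]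
          simp
        rw [hB, ih _ _ hnd' hpre, hA]

-- the outer loop of B matches A's transcript pass against the full map
lemma outer_eq (U : List String) (hU : U.Nodup)
    (ints : List (List (List (String × String)))) :
    ∀ (acc tr : List String), acc.Nodup →
      (ints.foldl (fun a i => i.foldl pvA_uniqStep a) acc) <+: U →
    pvB_loop ints (mkCM acc 0 PySem.Dict.empty, mkRM acc 0 PySem.Dict.empty, tr)
      = (mkCM (ints.foldl (fun a i => i.foldl pvA_uniqStep a) acc) 0 PySem.Dict.empty,
         mkRM (ints.foldl (fun a i => i.foldl pvA_uniqStep a) acc) 0 PySem.Dict.empty,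
         ints.foldl (fun full_transcript interaction =>
           interaction.foldl (fun tr line =>
             tr ++ [(mkCM U 0 PySem.Dict.empty).getD (pvLineGet line "character" "Unknown") "Unknown"
                    ++ ": " ++ pvLineGet line "dialogue" ""]) full_transcript
           ++ ["--- [New Interaction] ---"]) tr) := by
  induction ints with
  | nil => intro acc tr _ _; rfl
  | cons inter rest ih =>
      intro acc tr hnd hpre
      rw [List.foldl_cons] at hpre
      unfold pvB_loop
      rw [List.foldl_cons]
      have hpre_inner : (inter.foldl pvA_uniqStep acc) <+: U :=
        (uInts_prefix rest _).trans hpre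
      rw [inner_eq U hU inter acc tr hnd hpre_inner]
      have := ih (inter.foldl pvA_uniqStep acc)
        ((inter.foldl (fun tr line =>
           tr ++ [(mkCM U 0 PySem.Dict.empty).getD (pvLineGet line "character" "Unknown") "Unknown"
                  ++ ": " ++ pvLineGet line "dialogue" ""]) tr) ++ ["--- [New Interaction] ---"])
        (uLines_nodup inter acc hnd) hpre
      unfold pvB_loop at this
      rw [List.foldl_cons]
      exact this

-- ===== VERDICT =====
theorem get_char_mapping_and_text_spec : Claim_equal_get_char_mapping_and_text := by
  intro ints _
  unfold Spec_get_char_mapping_and_text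
  have hU := uniq_nodup ints
  have h := outer_eq (pvA_uniq ints) hU ints [] [] (by simp) (List.prefix_refl _)
  simp only [mkCM, mkRM] at h
  unfold get_char_mapping_and_text get_char_mapping_and_text_alt
  dsimp only
  rw [maps_eq, h]
  rfl
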